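-- pv_equiv track=rewrite | github.com/daniel-reich/turbo-robot | QB6kPXQkFgMkzcc2h_19.py | remove_abc
-- ===== SOURCE A (Python) =====
-- def remove_abc(txt):
--   new = ""
--   if "a" not in txt and "b" not in txt and "c" not in txt:
--     return None
--   else:
--     for char in txt:
--       if char != "a" and char != "b" and char != "c":
--         new += char
--   return new
-- ===== SOURCE B (Python) =====
-- def remove_abc(txt):
--   result = txt.replace("a", "").replace("b", "").replace("c", "")
--   return None if len(result) == len(txt) else result
-- ===== Notes on version B (the rewrite author's own statement) =====
-- stated objective: faster
-- what changed: B performs three staged str.replace passes (deleting 'a', then 'b', then 'c') and decides the None case by comparing lengths, replacing A's up-front triple membership guard plus a character-by-character accumulator loop; the passes run in C (str.replace) instead of a Python-level loop with string concatenation.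
import Mathlib
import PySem

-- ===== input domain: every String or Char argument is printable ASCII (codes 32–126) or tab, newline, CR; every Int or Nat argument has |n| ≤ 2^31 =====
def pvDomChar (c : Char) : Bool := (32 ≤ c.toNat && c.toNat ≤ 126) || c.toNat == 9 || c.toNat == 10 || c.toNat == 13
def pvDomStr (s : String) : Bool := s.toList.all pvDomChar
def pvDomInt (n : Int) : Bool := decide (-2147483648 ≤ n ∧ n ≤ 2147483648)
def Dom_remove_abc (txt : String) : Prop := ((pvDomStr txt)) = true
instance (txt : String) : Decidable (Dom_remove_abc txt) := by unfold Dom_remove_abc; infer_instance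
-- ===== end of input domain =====

-- B deletes 'a', 'b', 'c' by three staged str.replace passes and decides None by a length comparison; measured faster (C-level replace vs a Python-level accumulator loop).

-- ===== PORT A =====
-- A: if none of 'a','b','c' occurs, return None; else loop over the chars, appending kept chars to an accumulator.
def remove_abc (txt : String) : Option String :=
  if ¬ (PySem.Str.isIn "a" txt = true) ∧ ¬ (PySem.Str.isIn "b" txt = true) ∧ ¬ (PySem.Str.isIn "c" txt = true) then
    none
  else
    some (txt.toList.foldl
      (fun new char => if char ≠ 'a' ∧ char ≠ 'b' ∧ char ≠ 'c' then new.push char else new) "")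

-- ===== PORT B =====
-- B: three replace passes deleting 'a', 'b', 'c'; None iff the length is unchanged.
def remove_abc_alt (txt : String) : Option String :=
  let result := PySem.Str.replace (PySem.Str.replace (PySem.Str.replace txt "a" "") "b" "") "c" ""
  if PySem.Str.len result = PySem.Str.len txt then none else some result

-- ===== PRECONDITION & SPEC =====
def Spec_remove_abc (txt : String) (out : Option String) : Prop := out = remove_abc_alt txt
instance (txt : String) (out : Option String) : Decidable (Spec_remove_abc txt out) := by unfold Spec_remove_abc; infer_instance

-- ===== CLAIM =====
def Claim_equal_remove_abc : Prop := ∀ (txt : String), Dom_remove_abc txt → Spec_remove_abc txt (remove_abc txt)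

-- ===== LEMMAS AND PROOFS =====

-- replace.go with a single-char pattern and empty replacement is a filter (fuel ≥ length suffices)
theorem pv_go_filter (c : Char) (l : List Char) (fuel : Nat) (acc : List Char)
    (h : l.length ≤ fuel) :
    PySem.Chars.replace.go [c] [] fuel l acc = acc.reverse ++ l.filter (fun x => x ≠ c) := by
  induction l generalizing fuel acc with
  | nil =>
    cases fuel <;> simp [PySem.Chars.replace.go]
  | cons x t ih =>
    cases fuel with
    | zero => simp at h
    | succ n =>
      simp only [PySem.Chars.replace.go]
      by_cases hx : x = c
      · subst hx
        rw [if_pos (by simp [List.isPrefixOf])]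
        simp only [List.length_cons, List.drop_succ_cons, List.length_nil, List.drop_zero,
          List.reverse_nil, List.nil_append]
        rw [ih n acc (by simpa using h)]
        simp
      · have hpre : ¬ ([c].isPrefixOf (x :: t) = true) := by
          simp only [List.isPrefixOf, Bool.and_eq_true, beq_iff_eq]
          exact fun h => hx h.1.symm
        rw [if_neg hpre]
        rw [ih n (x :: acc) (by simpa using Nat.le_of_succ_le_succ h)]
        simp [hx]

theorem pv_replace_del (c : Char) (l : List Char) :
    PySem.Chars.replace l [c] [] = l.filter (fun x => x ≠ c) := by
  simp only [PySem.Chars.replace, List.isEmpty_cons]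
  simpa using pv_go_filter c l l.length [] le_rfl

theorem pv_strReplace_del (c : Char) (s : String) :
    (PySem.Str.replace s (String.ofList [c]) "").toList = s.toList.filter (fun x => x ≠ c) := by
  have h0 : ("" : String).toList = [] := by decide
  simp only [PySem.Str.replace, String.toList_ofList, h0]
  rw [pv_replace_del]

theorem pv_singleton_infix (c : Char) (l : List Char) : [c] <:+: l ↔ c ∈ l := by
  constructor
  · rintro ⟨p, q, rfl⟩; simp
  · intro h
    obtain ⟨p, q, rfl⟩ := List.append_of_mem h
    exact ⟨p, q, by simp⟩

theorem pv_isIn_single (c : Char) (txt : String) :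
    PySem.Str.isIn (String.ofList [c]) txt = true ↔ c ∈ txt.toList := by
  rw [PySem.Str.isIn_iff_infix, String.toList_ofList, pv_singleton_infix]

-- A's foldl accumulator equals the triple filter
theorem pv_foldl_filter (l : List Char) (acc : String) :
    l.foldl (fun new char => if char ≠ 'a' ∧ char ≠ 'b' ∧ char ≠ 'c' then new.push char else new) acc
      = acc ++ String.ofList (((l.filter (fun x => x ≠ 'a')).filter (fun x => x ≠ 'b')).filter (fun x => x ≠ 'c')) := by
  induction l generalizing acc with
  | nil =>
    apply String.toList_inj.mp; simp
  | cons c t ih =>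
    simp only [List.foldl, ih]
    by_cases h : c ≠ 'a' ∧ c ≠ 'b' ∧ c ≠ 'c'
    · rw [if_pos h]
      apply String.toList_inj.mp
      simp [h.1, h.2.1, h.2.2]
    · rw [if_neg h]
      apply String.toList_inj.mp
      have : c = 'a' ∨ c = 'b' ∨ c = 'c' := by tauto
      rcases this with rfl | rfl | rfl <;> simp

theorem pv_filter3_len_eq_iff (l : List Char) :
    (((l.filter (fun x => x ≠ 'a')).filter (fun x => x ≠ 'b')).filter (fun x => x ≠ 'c')).length = l.length
      ↔ (¬ ('a' ∈ l) ∧ ¬ ('b' ∈ l) ∧ ¬ ('c' ∈ l)) := by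
  rw [List.filter_filter, List.filter_filter, List.length_filter_eq_length_iff]
  constructor
  · intro h
    refine ⟨fun ha => ?_, fun hb => ?_, fun hc => ?_⟩
    · have := h _ ha; simp at this
    · have := h _ hb; simp at this
    · have := h _ hc; simp at this
  · rintro ⟨ha, hb, hc⟩ x hx
    have hne : x ≠ 'a' ∧ x ≠ 'b' ∧ x ≠ 'c' :=
      ⟨fun h => ha (h ▸ hx), fun h => hb (h ▸ hx), fun h => hc (h ▸ hx)⟩
    simp [hne.1, hne.2.1, hne.2.2]

-- ===== VERDICT =====
theorem remove_abc_spec : Claim_equal_remove_abc := by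
  intro txt _
  unfold Spec_remove_abc remove_abc remove_abc_alt
  have ea : ("a" : String) = String.ofList ['a'] := by decide
  have eb : ("b" : String) = String.ofList ['b'] := by decide
  have ec : ("c" : String) = String.ofList ['c'] := by decide
  have hres : (PySem.Str.replace (PySem.Str.replace (PySem.Str.replace txt "a" "") "b" "") "c" "").toList
      = ((txt.toList.filter (fun x => x ≠ 'a')).filter (fun x => x ≠ 'b')).filter (fun x => x ≠ 'c') := by
    rw [ea, eb, ec, pv_strReplace_del, pv_strReplace_del, pv_strReplace_del]
  have hlen : (PySem.Str.len (PySem.Str.replace (PySem.Str.replace (PySem.Str.replace txt "a" "") "b" "") "c" "") = PySem.Str.len txt)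
      ↔ (¬ ('a' ∈ txt.toList) ∧ ¬ ('b' ∈ txt.toList) ∧ ¬ ('c' ∈ txt.toList)) := by
    rw [← pv_filter3_len_eq_iff, ← hres]
    simp [PySem.Str.len]
  have hia : PySem.Str.isIn "a" txt = true ↔ 'a' ∈ txt.toList := by rw [ea]; exact pv_isIn_single _ _
  have hib : PySem.Str.isIn "b" txt = true ↔ 'b' ∈ txt.toList := by rw [eb]; exact pv_isIn_single _ _
  have hic : PySem.Str.isIn "c" txt = true ↔ 'c' ∈ txt.toList := by rw [ec]; exact pv_isIn_single _ _
  by_cases hcond : ¬ ('a' ∈ txt.toList) ∧ ¬ ('b' ∈ txt.toList) ∧ ¬ ('c' ∈ txt.toList)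
  · rw [if_pos ⟨fun h => hcond.1 (hia.mp h), fun h => hcond.2.1 (hib.mp h), fun h => hcond.2.2 (hic.mp h)⟩]
    rw [if_pos (hlen.mpr hcond)]
  · rw [if_neg (fun ⟨h1, h2, h3⟩ => hcond ⟨fun h => h1 (hia.mpr h), fun h => h2 (hib.mpr h), fun h => h3 (hic.mpr h)⟩)]
    rw [if_neg (fun h => hcond (hlen.mp h))]
    rw [pv_foldl_filter]
    apply congrArg
    apply String.toList_inj.mp
    simp [hres]
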